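-- pv_equiv track=rewrite | github.com/JRVeale/multiplayer-conway | MultiplayerConway.py | size_segment_grid
-- ===== SOURCE A (Python) =====
-- from math import floor
--
-- def size_segment_grid(x, y, teams):
--     # start with an approximation, will either be correct, or be above the
--     # largest square number that is too small
--     xt = floor(4 * x / (teams + 4))
--     yt = floor(4 * y / (teams + 4))
--
--     x_segments = floor(x/xt)
--     y_segments = floor(y/yt)
--     total_segments = 2 * (x_segments + y_segments) - 4
--
--     # add extra segments (making segments more square where possible)
--     # until enough segments for teams
--     while total_segments < teams:
--         # if not enough segments, divide the larger edge further
--         if xt > yt: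
--             x_segments += 1
--         else:
--             y_segments += 1
--         total_segments = 2 * (x_segments + y_segments) - 4
--
--     # recalculate xt, yt to create this number of segments
--     xt = floor(x / x_segments)
--     yt = floor(y / y_segments)
--
--     return xt, yt
-- ===== SOURCE B (Python) =====
-- def size_segment_grid(x, y, teams):
--     # Closed form: inside A's loop xt and yt never change, so every iteration
--     # increments the SAME counter; the number of iterations is
--     # k = max(0, ceil((teams - total0) / 2)).
--     xt = (4 * x) // (teams + 4)
--     yt = (4 * y) // (teams + 4)
--     x_segments = x // xt
--     y_segments = y // yt
--     total = 2 * (x_segments + y_segments) - 4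
--     k = max(0, (teams - total + 1) // 2)
--     if xt > yt:
--         x_segments += k
--     else:
--         y_segments += k
--     return x // x_segments, y // y_segments
-- ===== Notes on version B (the rewrite author's own statement) =====
-- stated objective: faster
-- what changed: Replaced A's while-loop (which increments one segment counter per iteration until enough segments exist) by the closed-form iteration count k = max(0, ceil((teams - total0)/2)), noting that xt and yt never change inside the loop so all increments go to the same counter.
import Mathlib
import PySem

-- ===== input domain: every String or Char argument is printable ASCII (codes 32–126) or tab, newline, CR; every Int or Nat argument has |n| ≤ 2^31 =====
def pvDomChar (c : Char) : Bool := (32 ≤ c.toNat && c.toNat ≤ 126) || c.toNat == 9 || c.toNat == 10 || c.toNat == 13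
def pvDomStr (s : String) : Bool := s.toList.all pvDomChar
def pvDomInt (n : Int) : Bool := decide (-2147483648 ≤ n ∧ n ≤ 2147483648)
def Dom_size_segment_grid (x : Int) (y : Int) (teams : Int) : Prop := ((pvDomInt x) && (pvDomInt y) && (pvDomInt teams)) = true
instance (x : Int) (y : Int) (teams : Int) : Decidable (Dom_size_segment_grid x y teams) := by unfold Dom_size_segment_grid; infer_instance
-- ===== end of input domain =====

-- B replaces A's O(teams) increment loop by the closed-form iteration count
-- k = max(0, ceil((teams - total0)/2)) (inside the loop xt and yt never change,
-- so every iteration increments the same counter); objective: faster.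
-- Python's floor(a/b) on float division equals integer floor division exactly
-- for the magnitudes admitted by Dom (|4*x| ≤ 2^33 < 2^53), so both ports use
-- PySem.Int.floordiv; this is exact on Dom.

-- ===== PORT A =====
-- the while loop of A, step for step (guard recomputes total_segments)
def sizeLoopA (teams xt yt xs ys : Int) : Int × Int :=
  if 2 * (xs + ys) - 4 < teams then
    if xt > yt then sizeLoopA teams xt yt (xs + 1) ys
    else sizeLoopA teams xt yt xs (ys + 1)
  else (xs, ys)
termination_by (teams - (2 * (xs + ys) - 4)).toNat
decreasing_by all_goals omega

def size_segment_grid (x : Int) (y : Int) (teams : Int) : List Int :=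
  let xt := PySem.Int.floordiv (4 * x) (teams + 4)
  let yt := PySem.Int.floordiv (4 * y) (teams + 4)
  let xs := PySem.Int.floordiv x xt
  let ys := PySem.Int.floordiv y yt
  let p := sizeLoopA teams xt yt xs ys
  [PySem.Int.floordiv x p.1, PySem.Int.floordiv y p.2]

-- ===== PORT B =====
def size_segment_grid_alt (x : Int) (y : Int) (teams : Int) : List Int :=
  let xt := PySem.Int.floordiv (4 * x) (teams + 4)
  let yt := PySem.Int.floordiv (4 * y) (teams + 4)
  let xs := PySem.Int.floordiv x xt
  let ys := PySem.Int.floordiv y yt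
  let total := 2 * (xs + ys) - 4
  let k := max 0 (PySem.Int.floordiv (teams - total + 1) 2)
  if xt > yt then [PySem.Int.floordiv x (xs + k), PySem.Int.floordiv y ys]
  else [PySem.Int.floordiv x xs, PySem.Int.floordiv y (ys + k)]

-- ===== PRECONDITION & SPEC =====
-- Pre_ = exactly the inputs where the Python A returns (elsewhere it raises
-- ZeroDivisionError on one of its four divisions): teams ≠ -4 and none of the
-- four divisors (xt, yt, final x_segments, final y_segments) is zero.
def Pre_size_segment_grid (x : Int) (y : Int) (teams : Int) : Prop :=
  teams ≠ -4 ∧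
  (let xt := PySem.Int.floordiv (4 * x) (teams + 4)
   let yt := PySem.Int.floordiv (4 * y) (teams + 4)
   xt ≠ 0 ∧ yt ≠ 0 ∧
   (let xs := PySem.Int.floordiv x xt
    let ys := PySem.Int.floordiv y yt
    let k := max 0 (PySem.Int.floordiv (teams - (2 * (xs + ys) - 4) + 1) 2)
    if xt > yt then xs + k ≠ 0 ∧ ys ≠ 0 else xs ≠ 0 ∧ ys + k ≠ 0))
instance (x : Int) (y : Int) (teams : Int) : Decidable (Pre_size_segment_grid x y teams) := by
  unfold Pre_size_segment_grid; infer_instance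

def pvWitness_size_segment_grid : Int × Int × Int := (8, 8, 4)

def Spec_size_segment_grid (x : Int) (y : Int) (teams : Int) (out : List Int) : Prop := out = size_segment_grid_alt x y teams
instance (x : Int) (y : Int) (teams : Int) (out : List Int) : Decidable (Spec_size_segment_grid x y teams out) := by unfold Spec_size_segment_grid; infer_instance

-- ===== CLAIM (what is proved, stated in full; the proofs are below) =====
def Claim_equal_size_segment_grid : Prop := ∀ (x : Int) (y : Int) (teams : Int), Dom_size_segment_grid x y teams → Pre_size_segment_grid x y teams → Spec_size_segment_grid x y teams (size_segment_grid x y teams)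

-- ===== LEMMAS AND PROOFS =====
-- The loop's xt, yt never change, so every iteration increments the same
-- counter; the number of iterations is max 0 ⌈(teams - total0)/2⌉.
theorem sizeLoopA_closed (teams xt yt xs ys : Int) :
    sizeLoopA teams xt yt xs ys =
      (if xt > yt
        then (xs + max 0 (PySem.Int.floordiv (teams - (2 * (xs + ys) - 4) + 1) 2), ys)
        else (xs, ys + max 0 (PySem.Int.floordiv (teams - (2 * (xs + ys) - 4) + 1) 2))) := by
  fun_induction sizeLoopA teams xt yt xs ys with
  | case1 xs ys h hxy ih =>
      rw [ih, if_pos hxy, if_pos hxy]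
      rw [PySem.Int.floordiv_eq_ediv_of_pos (by omega), PySem.Int.floordiv_eq_ediv_of_pos (by omega)] at *
      simp only [Prod.mk.injEq, and_true]
      omega
  | case2 xs ys h hxy ih =>
      rw [ih, if_neg hxy, if_neg hxy]
      rw [PySem.Int.floordiv_eq_ediv_of_pos (by omega), PySem.Int.floordiv_eq_ediv_of_pos (by omega)] at *
      simp only [Prod.mk.injEq, true_and]
      omega
  | case3 xs ys h =>
      have hz : max 0 (PySem.Int.floordiv (teams - (2 * (xs + ys) - 4) + 1) 2) = 0 := by
        rw [PySem.Int.floordiv_eq_ediv_of_pos (by omega)]; omega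
      rw [hz]
      split <;> (simp only [Prod.mk.injEq, and_true, true_and]; omega)

-- ===== VERDICT (by name: the statement is the Claim_ definition above) =====
theorem size_segment_grid_spec : Claim_equal_size_segment_grid := by
  intro x y teams _ _
  show size_segment_grid x y teams = size_segment_grid_alt x y teams
  unfold size_segment_grid size_segment_grid_alt
  simp only [sizeLoopA_closed]
  split <;> rfl
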